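-- pv_equiv track=rewrite | github.com/wlgns3511-crypto/ingredipeek | scripts/expand-off.py | extract_allergens
-- ===== SOURCE A (Python) =====
-- def extract_allergens(product):
--     """Extract allergen flags from product data."""
--     allergen_tags = product.get('allergens_tags', [])
--     allergen_map = {
--         'en:milk': 'allergen_milk',
--         'en:gluten': 'allergen_gluten',
--         'en:nuts': 'allergen_nuts',
--         'en:soybeans': 'allergen_soy',
--         'en:eggs': 'allergen_eggs',
--         'en:fish': 'allergen_fish',
--         'en:crustaceans': 'allergen_shellfish',
--         'en:peanuts': 'allergen_peanuts',
--     }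
--     flags = {v: 0 for v in allergen_map.values()}
--     for tag in allergen_tags:
--         if tag in allergen_map:
--             flags[allergen_map[tag]] = 1
--     return flags
-- ===== SOURCE B (Python) =====
-- def extract_allergens(product):
--     """Extract allergen flags from product data."""
--     allergen_map = {
--         'en:milk': 'allergen_milk',
--         'en:gluten': 'allergen_gluten',
--         'en:nuts': 'allergen_nuts',
--         'en:soybeans': 'allergen_soy',
--         'en:eggs': 'allergen_eggs',
--         'en:fish': 'allergen_fish',
--         'en:crustaceans': 'allergen_shellfish',
--         'en:peanuts': 'allergen_peanuts',
--     }
--     tag_set = set(product.get('allergens_tags', []))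
--     return {v: (1 if k in tag_set else 0) for k, v in allergen_map.items()}
-- ===== Notes on version B (the rewrite author's own statement) =====
-- stated objective: idiomatic
-- what changed: B reverses the traversal: it builds a set of the product's allergen tags once and produces the result in a single dict comprehension over the fixed 8-entry allergen map (membership test per output key), instead of pre-zeroing a flags dict and mutating it while looping over the input tags.
import Mathlib
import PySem

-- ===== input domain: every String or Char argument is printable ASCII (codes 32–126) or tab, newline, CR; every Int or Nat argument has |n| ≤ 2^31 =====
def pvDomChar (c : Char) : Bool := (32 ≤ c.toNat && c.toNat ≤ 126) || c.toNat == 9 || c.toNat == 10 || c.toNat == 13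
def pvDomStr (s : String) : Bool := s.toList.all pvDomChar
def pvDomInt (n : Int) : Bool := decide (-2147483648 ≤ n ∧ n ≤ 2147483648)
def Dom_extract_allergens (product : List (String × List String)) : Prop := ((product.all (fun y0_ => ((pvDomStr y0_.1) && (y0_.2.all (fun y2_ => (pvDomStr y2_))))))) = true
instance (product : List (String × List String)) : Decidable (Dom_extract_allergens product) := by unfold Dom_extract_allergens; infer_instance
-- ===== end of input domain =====

-- B reverses the traversal: it builds a set of the input tags once and produces the result
-- with a single dict comprehension over the fixed 8-entry allergen map (objective: idiomatic).


-- ===== PORT A =====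
-- allergen_map: the literal constant both Pythons spell out
def allergenMap : PySem.Dict String String := PySem.Dict.ofList
  [("en:milk", "allergen_milk"), ("en:gluten", "allergen_gluten"),
   ("en:nuts", "allergen_nuts"), ("en:soybeans", "allergen_soy"),
   ("en:eggs", "allergen_eggs"), ("en:fish", "allergen_fish"),
   ("en:crustaceans", "allergen_shellfish"), ("en:peanuts", "allergen_peanuts")]

def extract_allergens (product : List (String × List String)) : List (String × Int) :=
  let allergen_tags := (PySem.Dict.mk product).getD "allergens_tags" []
  -- flags = {v: 0 for v in allergen_map.values()}
  let flags := allergenMap.values.foldl (fun d v => d.insert v 0) (PySem.Dict.empty (κ := String) (ν := Int))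
  -- for tag in allergen_tags: if tag in allergen_map: flags[allergen_map[tag]] = 1
  let flags := allergen_tags.foldl (fun d tag =>
    if allergenMap.contains tag then
      match allergenMap.get? tag with
      | some v => d.insert v 1
      | none => d          -- unreachable: allergen_map[tag] is guarded by the contains test
    else d) flags
  flags.items

-- ===== PORT B =====
def extract_allergens_alt (product : List (String × List String)) : List (String × Int) :=
  let tag_set : PySem.Set String := PySem.Set.ofList ((PySem.Dict.mk product).getD "allergens_tags" [])
  -- {v: (1 if k in tag_set else 0) for k, v in allergen_map.items()}
  (allergenMap.items.foldl (fun d kv =>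
      d.insert kv.2 (if PySem.Set.contains tag_set kv.1 then (1 : Int) else 0))
    (PySem.Dict.empty (κ := String) (ν := Int))).items

-- ===== PRECONDITION & SPEC =====
def Spec_extract_allergens (product : List (String × List String)) (out : List (String × Int)) : Prop := out = extract_allergens_alt product
instance (product : List (String × List String)) (out : List (String × Int)) : Decidable (Spec_extract_allergens product out) := by unfold Spec_extract_allergens; infer_instance

-- ===== CLAIM (what is proved, stated in full; the proofs are below) =====
def Claim_equal_extract_allergens : Prop := ∀ (product : List (String × List String)), Dom_extract_allergens product → Spec_extract_allergens product (extract_allergens product)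

-- ===== LEMMAS AND PROOFS =====

-- the flags state of A's loop, its eight values abstracted
def flagsSt (a b c d e f g h : Int) : PySem.Dict String Int :=
  PySem.Dict.mk [("allergen_milk", a), ("allergen_gluten", b), ("allergen_nuts", c),
    ("allergen_soy", d), ("allergen_eggs", e), ("allergen_fish", f),
    ("allergen_shellfish", g), ("allergen_peanuts", h)]

theorem contains_allergenMap_false (t : String)
    (h1 : ¬ t = "en:milk") (h2 : ¬ t = "en:gluten") (h3 : ¬ t = "en:nuts")
    (h4 : ¬ t = "en:soybeans") (h5 : ¬ t = "en:eggs") (h6 : ¬ t = "en:fish")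
    (h7 : ¬ t = "en:crustaceans") (h8 : ¬ t = "en:peanuts") :
    allergenMap.contains t = false := by
  have hm : allergenMap = PySem.Dict.mk
    [("en:milk", "allergen_milk"), ("en:gluten", "allergen_gluten"),
     ("en:nuts", "allergen_nuts"), ("en:soybeans", "allergen_soy"),
     ("en:eggs", "allergen_eggs"), ("en:fish", "allergen_fish"),
     ("en:crustaceans", "allergen_shellfish"), ("en:peanuts", "allergen_peanuts")] := by decide
  rw [hm]
  simp [PySem.Dict.contains_mk, List.any_cons, h1, h2, h3, h4, h5, h6, h7, h8, Ne.symm]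

-- A's loop characterised: each flag becomes 1 exactly when its tag occurs in the list
theorem loopA_char (tags : List String) (a b c d e f g h : Int) :
    tags.foldl (fun d tag =>
      if allergenMap.contains tag then
        match allergenMap.get? tag with
        | some v => d.insert v 1
        | none => d
      else d) (flagsSt a b c d e f g h) =
    flagsSt (if tags.contains "en:milk" then 1 else a)
      (if tags.contains "en:gluten" then 1 else b)
      (if tags.contains "en:nuts" then 1 else c)
      (if tags.contains "en:soybeans" then 1 else d)
      (if tags.contains "en:eggs" then 1 else e)
      (if tags.contains "en:fish" then 1 else f)
      (if tags.contains "en:crustaceans" then 1 else g)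
      (if tags.contains "en:peanuts" then 1 else h) := by
  induction tags generalizing a b c d e f g h with
  | nil => simp
  | cons t ts ih =>
    rw [List.foldl_cons]
    by_cases h1 : t = "en:milk"
    · subst h1
      rw [show allergenMap.contains "en:milk" = true from by decide,
        show allergenMap.get? "en:milk" = some "allergen_milk" from by decide]
      simp only [if_true]
      rw [show (flagsSt a b c d e f g h).insert "allergen_milk" 1 = flagsSt 1 b c d e f g h from by
        simp [flagsSt, PySem.Dict.insert], ih]
      simp
    · by_cases h2 : t = "en:gluten"
      · subst h2
        rw [show allergenMap.contains "en:gluten" = true from by decide,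
          show allergenMap.get? "en:gluten" = some "allergen_gluten" from by decide]
        simp only [if_true]
        rw [show (flagsSt a b c d e f g h).insert "allergen_gluten" 1 = flagsSt a 1 c d e f g h from by
          simp [flagsSt, PySem.Dict.insert], ih]
        simp
      · by_cases h3 : t = "en:nuts"
        · subst h3
          rw [show allergenMap.contains "en:nuts" = true from by decide,
            show allergenMap.get? "en:nuts" = some "allergen_nuts" from by decide]
          simp only [if_true]
          rw [show (flagsSt a b c d e f g h).insert "allergen_nuts" 1 = flagsSt a b 1 d e f g h from by
            simp [flagsSt, PySem.Dict.insert], ih]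
          simp
        · by_cases h4 : t = "en:soybeans"
          · subst h4
            rw [show allergenMap.contains "en:soybeans" = true from by decide,
              show allergenMap.get? "en:soybeans" = some "allergen_soy" from by decide]
            simp only [if_true]
            rw [show (flagsSt a b c d e f g h).insert "allergen_soy" 1 = flagsSt a b c 1 e f g h from by
              simp [flagsSt, PySem.Dict.insert], ih]
            simp
          · by_cases h5 : t = "en:eggs"
            · subst h5
              rw [show allergenMap.contains "en:eggs" = true from by decide,
                show allergenMap.get? "en:eggs" = some "allergen_eggs" from by decide]
              simp only [if_true]
              rw [show (flagsSt a b c d e f g h).insert "allergen_eggs" 1 = flagsSt a b c d 1 f g h from by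
                simp [flagsSt, PySem.Dict.insert], ih]
              simp
            · by_cases h6 : t = "en:fish"
              · subst h6
                rw [show allergenMap.contains "en:fish" = true from by decide,
                  show allergenMap.get? "en:fish" = some "allergen_fish" from by decide]
                simp only [if_true]
                rw [show (flagsSt a b c d e f g h).insert "allergen_fish" 1 = flagsSt a b c d e 1 g h from by
                  simp [flagsSt, PySem.Dict.insert], ih]
                simp
              · by_cases h7 : t = "en:crustaceans"
                · subst h7
                  rw [show allergenMap.contains "en:crustaceans" = true from by decide,
                    show allergenMap.get? "en:crustaceans" = some "allergen_shellfish" from by decide]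
                  simp only [if_true]
                  rw [show (flagsSt a b c d e f g h).insert "allergen_shellfish" 1 = flagsSt a b c d e f 1 h from by
                    simp [flagsSt, PySem.Dict.insert], ih]
                  simp
                · by_cases h8 : t = "en:peanuts"
                  · subst h8
                    rw [show allergenMap.contains "en:peanuts" = true from by decide,
                      show allergenMap.get? "en:peanuts" = some "allergen_peanuts" from by decide]
                    simp only [if_true]
                    rw [show (flagsSt a b c d e f g h).insert "allergen_peanuts" 1 = flagsSt a b c d e f g 1 from by
                      simp [flagsSt, PySem.Dict.insert], ih]
                    simp
                  · rw [contains_allergenMap_false t h1 h2 h3 h4 h5 h6 h7 h8]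
                    simp only [Bool.false_eq_true, if_false]
                    rw [ih]
                    simp [h1, h2, h3, h4, h5, h6, h7, h8, Ne.symm]

-- ===== VERDICT (by name: the statement is the Claim_ definition above) =====
theorem extract_allergens_spec : Claim_equal_extract_allergens := by
  intro product _
  unfold Spec_extract_allergens extract_allergens extract_allergens_alt
  dsimp only
  generalize (PySem.Dict.mk product).getD "allergens_tags" [] = tags
  rw [show allergenMap.values.foldl (fun d v => d.insert v 0) (PySem.Dict.empty (κ := String) (ν := Int)) =
      flagsSt 0 0 0 0 0 0 0 0 from by decide]
  rw [loopA_char,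
    show allergenMap.items =
      [("en:milk", "allergen_milk"), ("en:gluten", "allergen_gluten"),
       ("en:nuts", "allergen_nuts"), ("en:soybeans", "allergen_soy"),
       ("en:eggs", "allergen_eggs"), ("en:fish", "allergen_fish"),
       ("en:crustaceans", "allergen_shellfish"), ("en:peanuts", "allergen_peanuts")] from by decide]
  simp [flagsSt, PySem.Dict.insert, PySem.Dict.contains_mk, PySem.Dict.empty,
    List.foldl_cons]
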